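/- GENERATED by tools/from_farm_form.py from prooffarm-gif/accepted/DGifGetImageDesc.3/Lemmas.lean (a worked proof of the farm's unit `DGifGetImageDesc.3`,
   accepted by the verdict) — do not edit. -/
import Gif.Spec.Units.DGifGetImageDesc_3
import Gif.Spec.AllSegs

open X86 X86.User Asan ProgX.Base ProgX.Base.Spec Gif.Spec

set_option maxRecDepth 4000
set_option maxHeartbeats 4000000

namespace Gif.Spec.DGifGetImageDesc_3

/-- **At 1095F0H (ret21), `malloc(56)` has returned an object**: `Mid` for the heap with the new object and the SAME forest (the
new object is not owned yet), the forest has no array, `rax` is the new object, which can be owned next to the forest's. -/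
structure s3_AtOk (H : Heap) (rest : List Obj) (frames : List (Nat × FrameLayout)) (F : Forest) (R : Rd)
    (Hc : Heap) (Fc : Forest) (u₀ e : State) (ret : Word) (v : State) : Prop where
  mid : DGifGetImageDesc.Mid Gif.L.DGifGetImageDesc.ret21 H rest frames F R (Hc.push 56 (r16 56)) Fc u₀ e ret v
  nosaved : Fc.saved = none
  rax : (v.reg .rax).toNat = Hc.next
  owns : Owns (Hc.push 56 (r16 56)) ((Hc.next, 56) :: Fc.owned)

/-- **At 1095F0H (ret21), `malloc(56)` has returned NULL**: `Mid` for the same heap and forest, no array, `rax = 0`. -/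
structure s3_AtFail (H : Heap) (rest : List Obj) (frames : List (Nat × FrameLayout)) (F : Forest) (R : Rd)
    (Hc : Heap) (Fc : Forest) (u₀ e : State) (ret : Word) (v : State) : Prop where
  mid : DGifGetImageDesc.Mid Gif.L.DGifGetImageDesc.ret21 H rest frames F R Hc Fc u₀ e ret v
  nosaved : Fc.saved = none
  rax : v.reg .rax = 0

/-- **1095E6H … the call of malloc … 1095F0H (ret21)** (dgif_lib.c:455 `malloc(sizeof(SavedImage))`). -/
theorem s3_seg_call (Lay : Layout) (hLay : Lay.hi = 0x1000000) (μ : Microarch) (hμ : UserX.MicroOK μ) (u₀ : State)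
    (hcode : HasCodeNat Lay u₀ Gif.L.DGifGetImageDesc.entry Gif.Code.code_DGifGetImageDesc.nat Gif.L.DGifGetImageDesc.size)
    (H : Heap) (rest : List Obj) (frames : List (Nat × FrameLayout)) (F : Forest) (R : Rd) (e : State) (ret : Word)
    (Hc : Heap) (Fc : Forest)
    (h_malloc : Calls Lay μ ProgX.Base.WayInv (ProgX.Base.conv u₀) ProgX.Base.L.malloc.entry
      (ProgX.Base.Spec.malloc.spec Hc rest frames))
    (v : State) (hat : DGifGetImageDesc.NoArray H rest frames F R Hc Fc u₀ e ret v) :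
    ReachVia Lay μ ProgX.Base.WayInv v (fun w =>
      s3_AtOk H rest frames F R Hc Fc u₀ e ret w ∨ s3_AtFail H rest frames F R Hc Fc u₀ e ret w) := by
  obtain ⟨⟨hbody, himgs, hlz⟩, hnosaved⟩ := hat
  have he := hbody.entry
  v_entry he
  obtain ⟨henv, hrdi⟩ := hbody.pre
  have w_rip := hbody.rip
  have c_rsp : v.reg .rsp = e.reg .rsp - 40 := hbody.rsp
  have c_rbx : v.reg .rbx = e.reg .rdi := hbody.rbx
  have w_kept : RegsKept [.rsp] v v := RegsKept.refl _ _
  have w_eq : Mem.EqOn ProgX.Base.L.textLo ProgX.Base.L.textHi u₀.mem v.mem := ProgX.Base.conv_code_eqOn hbody.code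
  have hdf := (show abiInv _ from hbody.abi).1
  have hmx := (show abiInv _ from hbody.abi).2
  have hsse := ProgX.Base.sseOK_of_abiInv hbody.abi
  have k_r13 : v.mem.readLE (e.reg .rsp - 8) 8 = (e.reg .r13).toNat := hbody.slot_r13
  have k_r12 : v.mem.readLE (e.reg .rsp - 16) 8 = (e.reg .r12).toNat := hbody.slot_r12
  have k_rbp : v.mem.readLE (e.reg .rsp - 24) 8 = (e.reg .rbp).toNat := hbody.slot_rbp
  have k_rbx : v.mem.readLE (e.reg .rsp - 32) 8 = (e.reg .rbx).toNat := hbody.slot_rbx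
  have k_ra : UInt64.ofNat (v.mem.readLE (e.reg .rsp) 8) = ret := hbody.slot_ra
  have hsame : Mem.SameExcept
    [⟨(e.reg .rsp).toNat - 496, (e.reg .rsp).toNat⟩,
     ⟨0x800000, 0x1000020⟩,
     ⟨R.cur, R.cur + 8⟩] e.mem v.mem := hbody.same
  have hcur := henv.ctx.cursor_range henv.heap.inv.shadow
  have hbase : Hc.base = 0x800000 := hbody.region.1.trans henv.heap.base
  have hlimit : Hc.limit = 0xC00000 := hbody.region.2.trans henv.heap.limit
  have hroom := hbody.inv.heap.room
  rw [hbase, hlimit] at hroom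
  have hnx : 0x800040 ≤ Hc.next ∧ Hc.next ≤ 0xC00020 := by
    rw [Heap.next_def, hbase]
    omega
  u_walk hcode [hμ.vendor] until [Gif.L.DGifGetImageDesc.ret21] span [ProgX.Base.L.textLo, ProgX.Base.L.textHi] side (v_side)
  case call_inv =>
    v_inv
  case pre_1095eb =>
    -- malloc's precondition: the heap's invariant over the pushed return address, at the callee's `rsp + 8` = the body's `rsp`
    have e_rsp : (s_1095eb.reg .rsp).toNat + 8 = (e.reg .rsp).toNat - 40 := by
      rw [w_rsp]
      u_omega
    refine ⟨?_, hbase, hlimit, henv.heap.text, henv.heap.offText⟩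
    rw [e_rsp, w_mem]
    exact hbody.inv.writeLE_out _ _ _ (by u_omega) (by rw [hbase]; left; u_omega) (by left; u_omega)
  -- 0x1095f0 (ret21): malloc has returned
  have e56 : (s_1095eb.reg .rdi).toNat = 56 := by
    rw [w_rdi_1095eb]
    decide
  have hpost : AllocPost Hc rest frames 32 (s_1095eb.reg .rdi).toNat (r16 (s_1095eb.reg .rdi).toNat) s_1095eb s_1095ebr :=
    w_post
  rw [e56] at hpost
  clear w_post
  have e8 : (s_1095eb.reg .rsp).toNat + 8 = (e.reg .rsp).toNat - 40 := by
    rw [w_rsp_1095eb]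
    u_omega
  -- the pushed return address keeps everything (a stack store below the cursor)
  obtain ⟨hinvA, hokA, hremA⟩ := store_stack hbody.inv hbody.ok ⟨hcur.1, hcur.2.1⟩ (e.reg .rsp - 48) 8 1086960
    (by u_omega) (by u_omega)
  v_after_call w_rsp_1095eb w_mem_1095eb
  simp only [shadowSpan, e56] at w_same
  -- THE SLOTS AND THE RETURN ADDRESS: over the pushed return address, then through malloc's footprint
  have hp13 : s_1095eb.mem.readLE (e.reg .rsp - 8) 8 = (e.reg .r13).toNat := by
    rw [w_mem_1095eb]
    u_frame k_r13
  rw [w_mem_1095eb] at hp13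
  have hs13 : s_1095ebr.mem.readLE (e.reg .rsp - 8) 8 = (e.reg .r13).toNat := by u_frame hp13
  have hp12 : s_1095eb.mem.readLE (e.reg .rsp - 16) 8 = (e.reg .r12).toNat := by
    rw [w_mem_1095eb]
    u_frame k_r12
  rw [w_mem_1095eb] at hp12
  have hs12 : s_1095ebr.mem.readLE (e.reg .rsp - 16) 8 = (e.reg .r12).toNat := by u_frame hp12
  have hpbp : s_1095eb.mem.readLE (e.reg .rsp - 24) 8 = (e.reg .rbp).toNat := by
    rw [w_mem_1095eb]
    u_frame k_rbp
  rw [w_mem_1095eb] at hpbp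
  have hsbp : s_1095ebr.mem.readLE (e.reg .rsp - 24) 8 = (e.reg .rbp).toNat := by u_frame hpbp
  have hpbx : s_1095eb.mem.readLE (e.reg .rsp - 32) 8 = (e.reg .rbx).toNat := by
    rw [w_mem_1095eb]
    u_frame k_rbx
  rw [w_mem_1095eb] at hpbx
  have hsbx : s_1095ebr.mem.readLE (e.reg .rsp - 32) 8 = (e.reg .rbx).toNat := by u_frame hpbx
  have hpra : UInt64.ofNat (s_1095eb.mem.readLE (e.reg .rsp) 8) = ret := by
    rw [w_mem_1095eb]
    u_frame k_ra
  rw [w_mem_1095eb] at hpra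
  have hsra : UInt64.ofNat (s_1095ebr.mem.readLE (e.reg .rsp) 8) = ret := by u_frame hpra
  -- what was written since `v`: stack below the body's `rsp`, the heap's bookkeeping, the shadow of the new object
  have hs2 : Mem.SameExcept
    [⟨(e.reg .rsp).toNat - 496, (e.reg .rsp).toNat - 40⟩,
     ⟨0x800000, 0x800008⟩,
     ⟨Hc.next - 32, Hc.next - 8⟩,
     ⟨0xC00000 + Hc.next / 8, 0xC00000 + (Hc.next + 56 + 7) / 8⟩] v.mem s_1095ebr.mem := by u_same
  -- the footprint since the entry: malloc's windows lie inside the function's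
  have hsame1 : Mem.SameExcept
    [⟨(e.reg .rsp).toNat - 496, (e.reg .rsp).toNat⟩,
     ⟨0x800000, 0x1000020⟩,
     ⟨R.cur, R.cur + 8⟩] e.mem s_1095ebr.mem := by u_same
  -- where pv is: an owned object of the present heap, below the next object
  have hpvin := hbody.ok.owns.inside hbody.inv.heap (o := (Fc.pv, 24936)) (List.mem_cons_of_mem _ List.mem_cons_self)
  have hpv1 : 0x800000 + 64 ≤ F.pv := by
    rw [← hbody.forest.2.1, ← hbase]
    exact hpvin.1
  have hpv2 : F.pv + 24936 + 32 ≤ Hc.next - 32 := by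
    rw [← hbody.forest.2.1, Heap.next_def]
    have := hpvin.2.1
    simp only at this
    omega
  clear hpvin
  have hlzN : LZOK s_1095ebr.mem F.pv := by
    apply hlz.sameExcept hs2 (by omega)
    intro w hw
    simp only [List.mem_cons, List.not_mem_nil, or_false] at hw
    rcases hw with rfl | rfl | rfl | rfl
    · left
      simp only
      omega
    · left
      simp only
      omega
    · right
      simp only
      omega
    · right
      simp only
      omega
  have hremN : rem R s_1095ebr.mem = rem R v.mem := by
    apply rem_sameExcept hs2 (by omega)
    intro w hw
    simp only [List.mem_cons, List.not_mem_nil, or_false] at hw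
    rcases hw with rfl | rfl | rfl | rfl
    · left
      simp only
      omega
    · right
      simp only
      omega
    · right
      simp only
      omega
    · right
      simp only
      omega
  by_cases hfit : Hc.Fits (r16 56)
  · -- ROOM: `rax = Hc.next`, the heap has one more object; the forest is untouched
    obtain ⟨hrax, hinvN⟩ := hpost.1 hfit
    rw [e8] at hinvN
    have hnl := hfit.next_le
    rw [hlimit] at hnl
    have hokN : GifOK (Hc.push 56 (r16 56)) Fc R s_1095ebr.mem := by
      refine hokA.through_alloc hinvA.heap ⟨hcur.1, hcur.2.1⟩ w_same ?_ 56 (r16 56)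
      intro w hw
      simp only [List.mem_cons, List.not_mem_nil, or_false] at hw
      rcases hw with rfl | rfl | rfl | rfl
      · apply Loose.stack hinvA.heap
        · simp only
          u_omega
        · simp only
          u_omega
        · simp only
          u_omega
      · apply Loose.cell hinvA.heap ⟨hcur.1, hcur.2.1⟩
        · simp only
          omega
        · simp only
          omega
      · apply Loose.above hinvA.heap ⟨hcur.1, hcur.2.1⟩
        · simp only
          rw [Heap.next_def]
          omega
        · simp only
          omega
      · apply Loose.shadow hinvA.heap hcur.2.1
        simp only
        omega
    refine ReachVia.done (Or.inl ?_)
    exact {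
      mid := {
        at_ := {
          entry := hbody.entry
          pre := hbody.pre
          rip := w_rip
          rsp := w_rsp
          rbx := (w_kept.get .rbx rfl).trans hbody.rbx
          r14 := (w_kept.get .r14 rfl).trans hbody.r14
          r15 := (w_kept.get .r15 rfl).trans hbody.r15
          slot_r13 := hs13
          slot_r12 := hs12
          slot_rbp := hsbp
          slot_rbx := hsbx
          slot_ra := hsra
          inv := hinvN
          region := hbody.region.trans (SameRegion.push Hc 56 (r16 56))
          forest := hbody.forest
          ok := hokN
          rem := by
            rw [hremN]
            exact hbody.rem
          same := hsame1
          code := w_code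
          abi := w_inv
        }
        imgs := himgs
        lz := hlzN
      }
      nosaved := hnosaved
      rax := hrax
      owns := hbody.ok.owns.push_cons hbody.inv.heap 56 (r16 56)
    }
  · -- NO ROOM: `rax = 0`, the same heap, only stack written
    obtain ⟨hrax0, hinvF, hunF, hstack⟩ := hpost.2 hfit
    rw [e8] at hinvF
    rw [w_rsp_1095eb, w_mem_1095eb] at hstack
    have hokF : GifOK Hc Fc R s_1095ebr.mem := by
      refine hokA.sameExcept hinvA.heap ⟨hcur.1, hcur.2.1⟩ hstack ?_
      intro w hw
      simp only [List.mem_cons, List.not_mem_nil, or_false] at hw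
      rcases hw with rfl
      apply Loose.stack hinvA.heap
      · simp only
        u_omega
      · simp only
        u_omega
      · simp only
        u_omega
    refine ReachVia.done (Or.inr ?_)
    exact {
      mid := {
        at_ := {
          entry := hbody.entry
          pre := hbody.pre
          rip := w_rip
          rsp := w_rsp
          rbx := (w_kept.get .rbx rfl).trans hbody.rbx
          r14 := (w_kept.get .r14 rfl).trans hbody.r14
          r15 := (w_kept.get .r15 rfl).trans hbody.r15
          slot_r13 := hs13
          slot_r12 := hs12
          slot_rbp := hsbp
          slot_rbx := hsbx
          slot_ra := hsra
          inv := hinvF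
          region := hbody.region
          forest := hbody.forest
          ok := hokF
          rem := by
            rw [hremN]
            exact hbody.rem
          same := hsame1
          code := w_code
          abi := w_inv
        }
        imgs := himgs
        lz := hlzN
      }
      nosaved := hnosaved
      rax := hrax0
    }

/-- **1095F0H (ret21) … 109503H, malloc returned an object** (dgif_lib.c:454-455): `rbp = rax`, the checked store of the new array to
`gif.SavedImages`, `test rbp, rbp ; jne` taken. The forest gets `saved := some ⟨Hc.next, 1, []⟩`. -/
theorem s3_seg_ok (Lay : Layout) (hLay : Lay.hi = 0x1000000) (μ : Microarch) (hμ : UserX.MicroOK μ) (u₀ : State)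
    (hcode : HasCodeNat Lay u₀ Gif.L.DGifGetImageDesc.entry Gif.Code.code_DGifGetImageDesc.nat Gif.L.DGifGetImageDesc.size)
    (H : Heap) (rest : List Obj) (frames : List (Nat × FrameLayout)) (F : Forest) (R : Rd) (e : State) (ret : Word)
    (Hc : Heap) (Fc : Forest)
    (h_asan_store8_noabort : Asan.SmallCheck Lay μ ProgX.Base.WayInv (ProgX.Base.CodeOK u₀) [.rax, .rcx, .rdx] 8
      ProgX.Base.L.__asan_store8_noabort.entry)
    (v : State) (hat : s3_AtOk H rest frames F R Hc Fc u₀ e ret v) :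
    ReachVia Lay μ ProgX.Base.WayInv v (fun w =>
      (∃ (H' : Heap) (F' : Forest), DGifGetImageDesc.Grown H rest frames F R H' F' u₀ e ret w) ∨
      DGifGetImageDesc.Done H rest frames F R Hc Fc u₀ e ret w) := by
  obtain ⟨⟨hbody, himgs, hlz⟩, hnosaved, hrax, howns⟩ := hat
  have he := hbody.entry
  v_entry he
  obtain ⟨henv, hrdi⟩ := hbody.pre
  have w_rip := hbody.rip
  have c_rsp : v.reg .rsp = e.reg .rsp - 40 := hbody.rsp
  have c_rbx : v.reg .rbx = e.reg .rdi := hbody.rbx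
  obtain ⟨z, c_rax⟩ : ∃ z, v.reg .rax = z := ⟨_, rfl⟩
  rw [c_rax] at hrax
  have w_kept : RegsKept [.rsp] v v := RegsKept.refl _ _
  have w_eq : Mem.EqOn ProgX.Base.L.textLo ProgX.Base.L.textHi u₀.mem v.mem := ProgX.Base.conv_code_eqOn hbody.code
  have hdf := (show abiInv _ from hbody.abi).1
  have hmx := (show abiInv _ from hbody.abi).2
  have hsse := ProgX.Base.sseOK_of_abiInv hbody.abi
  have k_r13 : v.mem.readLE (e.reg .rsp - 8) 8 = (e.reg .r13).toNat := hbody.slot_r13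
  have k_r12 : v.mem.readLE (e.reg .rsp - 16) 8 = (e.reg .r12).toNat := hbody.slot_r12
  have k_rbp : v.mem.readLE (e.reg .rsp - 24) 8 = (e.reg .rbp).toNat := hbody.slot_rbp
  have k_rbx : v.mem.readLE (e.reg .rsp - 32) 8 = (e.reg .rbx).toNat := hbody.slot_rbx
  have k_ra : UInt64.ofNat (v.mem.readLE (e.reg .rsp) 8) = ret := hbody.slot_ra
  have hsame : Mem.SameExcept
    [⟨(e.reg .rsp).toNat - 496, (e.reg .rsp).toNat⟩,
     ⟨0x800000, 0x1000020⟩,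
     ⟨R.cur, R.cur + 8⟩] e.mem v.mem := hbody.same
  have hcur := henv.ctx.cursor_range henv.heap.inv.shadow
  have hbase : (Hc.push 56 (r16 56)).base = 0x800000 := hbody.region.1.trans henv.heap.base
  -- where gif is, as numbers
  have hgin := hbody.ok.owns.inside hbody.inv.heap (o := (Fc.gif, 120)) List.mem_cons_self
  have hgif : (e.reg .rdi).toNat = Fc.gif := hrdi.trans hbody.forest.1.symm
  have hg1 : 0x800040 ≤ Fc.gif := by
    have := hgin.1
    rw [hbase] at this
    exact this
  have hg2 : Fc.gif + 120 + 32 ≤ 0xC00000 := hgin.2.2.2.2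
  clear hgin
  -- where the new object is
  have hnx : 0x800040 ≤ Hc.next := by
    have := hbody.inv.heap.lo
    rw [Heap.next_def]
    have hb : Hc.base = 0x800000 := hbase
    omega
  have hgl : LiveIn ((Hc.push 56 (r16 56)).liveObjs ++ rest) frames Fc.gif 120 :=
    hbody.ok.gif_live.liveIn rest _ (Nat.le_refl _) (Nat.le_refl _)
  u_walk hcode [hμ.vendor] until [Gif.L.DGifGetImageDesc.at_109503, Gif.L.DGifGetImageDesc.at_10949a] span [ProgX.Base.L.textLo, ProgX.Base.L.textHi] side (v_side)
  case check_1095f7 =>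
    -- dgif_lib.c:454 the store of `gif.SavedImages`: 8 bytes inside gif
    have hun : ShadowUntouched v.mem s_1095f7.mem := by v_untouched
    exact hgl.accSmall hbody.inv.shadow hun _ 8 (by decide) (by u_omega) (by u_omega)
  -- 0x109503: THE NEW ARRAY IS STORED. The two stores since `v`: the check call's return address (stack) …
  obtain ⟨hinvA, hokA, hremA⟩ := store_stack hbody.inv hbody.ok ⟨hcur.1, hcur.2.1⟩ (e.reg .rsp - 48) 8 1086972
    (by u_omega) (by u_omega)
  -- … then `gif.SavedImages` (`[gif + 72, gif + 80)`), which changes the forest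
  have ea : (e.reg .rdi + 72).toNat = Fc.gif + 72 := by u_omega
  have hinvB := hinvA.writeLE_live hokA.gif_live (e.reg .rdi + 72) 8 z.toNat (by omega) (by omega)
  have hsB : Mem.SameExcept [⟨Fc.gif + 72, Fc.gif + 80⟩] (v.mem.writeLE (e.reg .rsp - 48) 8 1086972)
      ((v.mem.writeLE (e.reg .rsp - 48) 8 1086972).writeLE (e.reg .rdi + 72) 8 z.toNat) := by
    refine Mem.SameExcept.writeLE _ _ _ 8 _ (by omega) ⟨_, List.mem_cons_self, ?_, ?_⟩
    · simp only
      omega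
    · simp only
      omega
  -- the pointer field reads back the new array, the count is still 0
  have hold := hokA.shape.saved
  rw [hnosaved] at hold
  obtain ⟨_, hcount0⟩ : GifFileType.SavedImages (v.mem.writeLE (e.reg .rsp - 48) 8 1086972) Fc.gif = 0 ∧
      GifFileType.ImageCount (v.mem.writeLE (e.reg .rsp - 48) 8 1086972) Fc.gif = 0 := hold
  have e1 : GifFileType.SavedImages
      ((v.mem.writeLE (e.reg .rsp - 48) 8 1086972).writeLE (e.reg .rdi + 72) 8 z.toNat) Fc.gif = Hc.next := by
    simp only [gfield]
    rw [rd_writeLE_same _ (e.reg .rdi + 72) 8 z.toNat _ ea (by decide)]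
    have := z.toNat_lt
    omega
  have e2 : GifFileType.ImageCount
      ((v.mem.writeLE (e.reg .rsp - 48) 8 1086972).writeLE (e.reg .rdi + 72) 8 z.toNat) Fc.gif = 0 := by
    simp only [gfield] at hcount0 ⊢
    rw [rd_writeLE_disjoint _ _ _ _ _ _ (by omega) (by omega) (by omega)]
    exact hcount0
  have hshapeB : Shape { Fc with saved := some ⟨Hc.next, 1, []⟩ } R
      ((v.mem.writeLE (e.reg .rsp - 48) 8 1086972).writeLE (e.reg .rdi + 72) 8 z.toNat) := by
    refine hokA.shape.set_saved (hokA.owns.placed hinvA.heap) hinvA.heap ⟨hcur.1, hcur.2.1⟩ hsB ?_ (some ⟨Hc.next, 1, []⟩) ?_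
    · intro w hw
      have e := List.mem_singleton.mp hw
      rw [e]
      right
      left
      exact ⟨Nat.le_refl _, Nat.le_refl _⟩
    · rw [e1, e2]
      exact SavedAt.first Hc.next 1 _ (Nat.le_refl 1)
  -- the new object is owned: it takes the place of the (empty) `saved` component
  have hownsB : Owns (Hc.push 56 (r16 56)) ({ Fc with saved := some ⟨Hc.next, 1, []⟩ } : Forest).owned := by
    have hperm1 : Fc.owned.Perm Fc.ownedButSaved := by
      have := Fc.owned_saved
      rw [hnosaved] at this
      exact this
    have hperm2 : ({ Fc with saved := some ⟨Hc.next, 1, []⟩ } : Forest).owned.Perm ((Hc.next, 56) :: Fc.ownedButSaved) :=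
      Forest.owned_saved _
    exact howns.perm ((hperm1.cons _).trans hperm2.symm)
  -- `rem` and `LZOK` through the second store (gif and pv are 64 bytes apart)
  have hremB : rem R ((v.mem.writeLE (e.reg .rsp - 48) 8 1086972).writeLE (e.reg .rdi + 72) 8 z.toNat) =
      rem R (v.mem.writeLE (e.reg .rsp - 48) 8 1086972) := by
    apply rem_sameExcept hsB (by omega)
    intro w hw
    have e := List.mem_singleton.mp hw
    rw [e]
    right
    simp only
    omega
  have hne : ((Fc.gif, 120) : Nat × Nat) ≠ (Fc.pv, 24936) := by
    intro h
    have h2 := congrArg Prod.snd h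
    simp only at h2
    omega
  have hfar := hokA.owns.far hinvA.heap (a := (Fc.gif, 120)) (b := (Fc.pv, 24936)) List.mem_cons_self
    (List.mem_cons_of_mem _ List.mem_cons_self) hne
  simp only at hfar
  have hpvlo : 0x800040 ≤ Fc.pv := by
    have := (hokA.owns.inside hinvA.heap (o := (Fc.pv, 24936)) (List.mem_cons_of_mem _ List.mem_cons_self)).1
    rw [hbase] at this
    exact this
  have hpvhi : Fc.pv + 24936 + 32 ≤ 0xC00000 :=
    (hokA.owns.inside hinvA.heap (o := (Fc.pv, 24936)) (List.mem_cons_of_mem _ List.mem_cons_self)).2.2.2.2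
  have hpv : Fc.pv = F.pv := hbody.forest.2.1
  rw [hpv] at hfar hpvlo hpvhi
  have hs : Mem.SameExcept
    [⟨(e.reg .rsp).toNat - 496, (e.reg .rsp).toNat - 40⟩,
     ⟨Fc.gif + 72, Fc.gif + 80⟩] v.mem s_109603.mem := by
    rw [w_mem]
    u_same
  have hlzB : LZOK s_109603.mem F.pv := by
    apply hlz.sameExcept hs (by omega)
    intro w hw
    simp only [List.mem_cons, List.not_mem_nil, or_false] at hw
    rcases hw with rfl | rfl
    · left
      simp only
      omega
    · simp only
      omega
  rw [← w_mem] at hinvB hshapeB hremB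
  refine ReachVia.done (Or.inl ⟨Hc.push 56 (r16 56), { Fc with saved := some ⟨Hc.next, 1, []⟩ }, ?_⟩)
  exact {
    mid := {
      at_ := {
        entry := hbody.entry
        pre := hbody.pre
        rip := w_rip
        rsp := w_rsp
        rbx := (w_kept.get .rbx rfl).trans hbody.rbx
        r14 := (w_kept.get .r14 rfl).trans hbody.r14
        r15 := (w_kept.get .r15 rfl).trans hbody.r15
        slot_r13 := by
          rw [w_mem]
          u_frame k_r13
        slot_r12 := by
          rw [w_mem]
          u_frame k_r12
        slot_rbp := by
          rw [w_mem]
          u_frame k_rbp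
        slot_rbx := by
          rw [w_mem]
          u_frame k_rbx
        slot_ra := by
          rw [w_mem]
          u_frame k_ra
        inv := hinvB
        region := hbody.region
        forest := hbody.forest
        ok := ⟨hownsB, hshapeB⟩
        rem := by
          rw [hremB, hremA]
          exact hbody.rem
        same := by
          rw [w_mem]
          u_same
        code := ProgX.Base.conv_code_in w_eq
        abi := by
          refine ProgX.Base.abiInv_of ?_ ?_
          · rw [w_flags]
            simp only [X86.User.df_setStatus]
            exact w_df_1095f7
          · rw [w_mxcsr]
            exact hmx
      }
      imgs := by
        rw [Forest.imgs_some (s := ⟨Hc.next, 1, []⟩) rfl, ← himgs, Forest.imgs_none hnosaved]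
      lz := hlzB
    }
    room := ⟨⟨Hc.next, 1, []⟩, rfl, Nat.le_refl _⟩
  }

/-- **1095F0H (ret21) … 10949AH, malloc returned NULL** (dgif_lib.c:454-457): `rbp = 0`, the checked store of NULL to
`gif.SavedImages` (the field held NULL: the forest is the same), `jne` not taken, the checked store of
`gif.Error = D_GIF_ERR_NOT_ENOUGH_MEM`, to the exit with `ebp = 0`. -/
theorem s3_seg_fail (Lay : Layout) (hLay : Lay.hi = 0x1000000) (μ : Microarch) (hμ : UserX.MicroOK μ) (u₀ : State)
    (hcode : HasCodeNat Lay u₀ Gif.L.DGifGetImageDesc.entry Gif.Code.code_DGifGetImageDesc.nat Gif.L.DGifGetImageDesc.size)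
    (H : Heap) (rest : List Obj) (frames : List (Nat × FrameLayout)) (F : Forest) (R : Rd) (e : State) (ret : Word)
    (Hc : Heap) (Fc : Forest)
    (h_asan_store8_noabort : Asan.SmallCheck Lay μ ProgX.Base.WayInv (ProgX.Base.CodeOK u₀) [.rax, .rcx, .rdx] 8
      ProgX.Base.L.__asan_store8_noabort.entry)
    (h_asan_store4_noabort : Asan.SmallCheck Lay μ ProgX.Base.WayInv (ProgX.Base.CodeOK u₀) [.rax, .rcx, .rdx] 4
      ProgX.Base.L.__asan_store4_noabort.entry)
    (v : State) (hat : s3_AtFail H rest frames F R Hc Fc u₀ e ret v) :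
    ReachVia Lay μ ProgX.Base.WayInv v (fun w =>
      (∃ (H' : Heap) (F' : Forest), DGifGetImageDesc.Grown H rest frames F R H' F' u₀ e ret w) ∨
      DGifGetImageDesc.Done H rest frames F R Hc Fc u₀ e ret w) := by
  obtain ⟨⟨hbody, himgs, hlz⟩, hnosaved, c_rax⟩ := hat
  have he := hbody.entry
  v_entry he
  obtain ⟨henv, hrdi⟩ := hbody.pre
  have w_rip := hbody.rip
  have c_rsp : v.reg .rsp = e.reg .rsp - 40 := hbody.rsp
  have c_rbx : v.reg .rbx = e.reg .rdi := hbody.rbx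
  have w_kept : RegsKept [.rsp] v v := RegsKept.refl _ _
  have w_eq : Mem.EqOn ProgX.Base.L.textLo ProgX.Base.L.textHi u₀.mem v.mem := ProgX.Base.conv_code_eqOn hbody.code
  have hdf := (show abiInv _ from hbody.abi).1
  have hmx := (show abiInv _ from hbody.abi).2
  have hsse := ProgX.Base.sseOK_of_abiInv hbody.abi
  have k_r13 : v.mem.readLE (e.reg .rsp - 8) 8 = (e.reg .r13).toNat := hbody.slot_r13
  have k_r12 : v.mem.readLE (e.reg .rsp - 16) 8 = (e.reg .r12).toNat := hbody.slot_r12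
  have k_rbp : v.mem.readLE (e.reg .rsp - 24) 8 = (e.reg .rbp).toNat := hbody.slot_rbp
  have k_rbx : v.mem.readLE (e.reg .rsp - 32) 8 = (e.reg .rbx).toNat := hbody.slot_rbx
  have k_ra : UInt64.ofNat (v.mem.readLE (e.reg .rsp) 8) = ret := hbody.slot_ra
  have hsame : Mem.SameExcept
    [⟨(e.reg .rsp).toNat - 496, (e.reg .rsp).toNat⟩,
     ⟨0x800000, 0x1000020⟩,
     ⟨R.cur, R.cur + 8⟩] e.mem v.mem := hbody.same
  have hcur := henv.ctx.cursor_range henv.heap.inv.shadow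
  have hbase : Hc.base = 0x800000 := hbody.region.1.trans henv.heap.base
  -- where gif is, as numbers
  have hgin := hbody.ok.owns.inside hbody.inv.heap (o := (Fc.gif, 120)) List.mem_cons_self
  have hgif : (e.reg .rdi).toNat = Fc.gif := hrdi.trans hbody.forest.1.symm
  have hg1 : 0x800040 ≤ Fc.gif := by
    have := hgin.1
    rw [hbase] at this
    exact this
  have hg2 : Fc.gif + 120 + 32 ≤ 0xC00000 := hgin.2.2.2.2
  clear hgin
  have hgl : LiveIn (Hc.liveObjs ++ rest) frames Fc.gif 120 :=
    hbody.ok.gif_live.liveIn rest _ (Nat.le_refl _) (Nat.le_refl _)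
  u_walk hcode [hμ.vendor] until [Gif.L.DGifGetImageDesc.at_109503, Gif.L.DGifGetImageDesc.at_10949a] span [ProgX.Base.L.textLo, ProgX.Base.L.textHi] side (v_side)
  case check_1095f7 =>
    -- dgif_lib.c:454 the store of `gif.SavedImages`: 8 bytes inside gif
    have hun : ShadowUntouched v.mem s_1095f7.mem := by v_untouched
    exact hgl.accSmall hbody.inv.shadow hun _ 8 (by decide) (by u_omega) (by u_omega)
  case check_10960d =>
    -- dgif_lib.c:456 the store of `gif.Error`: 4 bytes inside gif
    have hun : ShadowUntouched v.mem s_10960d.mem := by v_untouched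
    exact hgl.accSmall hbody.inv.shadow hun _ 4 (by decide) (by u_omega) (by u_omega)
  -- 0x10949a: THE FOUR STORES SINCE `v`. (A) the first check call's return address (stack) …
  obtain ⟨hinvA, hokA, hremA⟩ := store_stack hbody.inv hbody.ok ⟨hcur.1, hcur.2.1⟩ (e.reg .rsp - 48) 8 1086972
    (by u_omega) (by u_omega)
  -- … (B) NULL to `gif.SavedImages` (`[gif + 72, gif + 80)`): the field held NULL, the forest is the same …
  have ea : (e.reg .rdi + 72).toNat = Fc.gif + 72 := by u_omega
  have hinvB := hinvA.writeLE_live hokA.gif_live (e.reg .rdi + 72) 8 0 (by omega) (by omega)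
  have hsB : Mem.SameExcept [⟨Fc.gif + 72, Fc.gif + 80⟩] (v.mem.writeLE (e.reg .rsp - 48) 8 1086972)
      ((v.mem.writeLE (e.reg .rsp - 48) 8 1086972).writeLE (e.reg .rdi + 72) 8 0) := by
    refine Mem.SameExcept.writeLE _ _ _ 8 _ (by omega) ⟨_, List.mem_cons_self, ?_, ?_⟩
    · simp only
      omega
    · simp only
      omega
  have hold := hokA.shape.saved
  rw [hnosaved] at hold
  obtain ⟨_, hcount0⟩ : GifFileType.SavedImages (v.mem.writeLE (e.reg .rsp - 48) 8 1086972) Fc.gif = 0 ∧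
      GifFileType.ImageCount (v.mem.writeLE (e.reg .rsp - 48) 8 1086972) Fc.gif = 0 := hold
  have e1 : GifFileType.SavedImages
      ((v.mem.writeLE (e.reg .rsp - 48) 8 1086972).writeLE (e.reg .rdi + 72) 8 0) Fc.gif = 0 := by
    simp only [gfield]
    rw [rd_writeLE_same _ (e.reg .rdi + 72) 8 0 _ ea (by decide)]
  have e2 : GifFileType.ImageCount
      ((v.mem.writeLE (e.reg .rsp - 48) 8 1086972).writeLE (e.reg .rdi + 72) 8 0) Fc.gif = 0 := by
    simp only [gfield] at hcount0 ⊢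
    rw [rd_writeLE_disjoint _ _ _ _ _ _ (by omega) (by omega) (by omega)]
    exact hcount0
  have hshapeB : Shape Fc R ((v.mem.writeLE (e.reg .rsp - 48) 8 1086972).writeLE (e.reg .rdi + 72) 8 0) := by
    have h0 : Shape { Fc with saved := none } R
        ((v.mem.writeLE (e.reg .rsp - 48) 8 1086972).writeLE (e.reg .rdi + 72) 8 0) := by
      refine hokA.shape.set_saved (hokA.owns.placed hinvA.heap) hinvA.heap ⟨hcur.1, hcur.2.1⟩ hsB ?_ none ?_
      · intro w hw
        have e := List.mem_singleton.mp hw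
        rw [e]
        right
        left
        exact ⟨Nat.le_refl _, Nat.le_refl _⟩
      · exact ⟨e1, e2⟩
    rw [Forest.set_saved_eq hnosaved] at h0
    exact h0
  have hokB : GifOK Hc Fc R ((v.mem.writeLE (e.reg .rsp - 48) 8 1086972).writeLE (e.reg .rdi + 72) 8 0) :=
    ⟨hokA.owns, hshapeB⟩
  have hremB : rem R ((v.mem.writeLE (e.reg .rsp - 48) 8 1086972).writeLE (e.reg .rdi + 72) 8 0) =
      rem R (v.mem.writeLE (e.reg .rsp - 48) 8 1086972) := by
    apply rem_sameExcept hsB (by omega)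
    intro w hw
    have e := List.mem_singleton.mp hw
    rw [e]
    right
    simp only
    omega
  -- … (C) the second check call's return address (stack), (D) `gif.Error` (a scalar field of gif)
  obtain ⟨hinvC, hokC, hremC⟩ := store_stack hinvB hokB ⟨hcur.1, hcur.2.1⟩ (e.reg .rsp - 48) 8 1086994
    (by u_omega) (by u_omega)
  obtain ⟨hinvD, hokD, hremD⟩ := store_gif hinvC hokC ⟨hcur.1, hcur.2.1⟩ hbase (e.reg .rdi + 96) 4 109
    (Or.inr (Or.inr (by u_omega)))
  rw [← w_mem] at hinvD hokD hremD
  have hremF : rem R s_109619.mem = rem R v.mem := hremD.trans (hremC.trans (hremB.trans hremA))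
  -- `LZOK` through the four stores (gif and pv are 64 bytes apart)
  have hne : ((Fc.gif, 120) : Nat × Nat) ≠ (Fc.pv, 24936) := by
    intro h
    have h2 := congrArg Prod.snd h
    simp only at h2
    omega
  have hfar := hbody.ok.owns.far hbody.inv.heap (a := (Fc.gif, 120)) (b := (Fc.pv, 24936)) List.mem_cons_self
    (List.mem_cons_of_mem _ List.mem_cons_self) hne
  simp only at hfar
  have hpvlo : 0x800040 ≤ Fc.pv := by
    have := (hbody.ok.owns.inside hbody.inv.heap (o := (Fc.pv, 24936)) (List.mem_cons_of_mem _ List.mem_cons_self)).1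
    rw [hbase] at this
    exact this
  have hpvhi : Fc.pv + 24936 + 32 ≤ 0xC00000 :=
    (hbody.ok.owns.inside hbody.inv.heap (o := (Fc.pv, 24936)) (List.mem_cons_of_mem _ List.mem_cons_self)).2.2.2.2
  have hpv : Fc.pv = F.pv := hbody.forest.2.1
  rw [hpv] at hfar hpvlo hpvhi
  have hs : Mem.SameExcept
    [⟨(e.reg .rsp).toNat - 496, (e.reg .rsp).toNat - 40⟩,
     ⟨Fc.gif + 72, Fc.gif + 80⟩,
     ⟨Fc.gif + 96, Fc.gif + 100⟩] v.mem s_109619.mem := by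
    rw [w_mem]
    u_same
  have hlzF : LZOK s_109619.mem F.pv := by
    apply hlz.sameExcept hs (by omega)
    intro w hw
    simp only [List.mem_cons, List.not_mem_nil, or_false] at hw
    rcases hw with rfl | rfl | rfl
    · left
      simp only
      omega
    · simp only
      omega
    · simp only
      omega
  refine ReachVia.done (Or.inr ?_)
  exact {
    at_ := {
      entry := hbody.entry
      pre := hbody.pre
      rip := w_rip
      rsp := w_rsp
      rbx := (w_kept.get .rbx rfl).trans hbody.rbx
      r14 := (w_kept.get .r14 rfl).trans hbody.r14
      r15 := (w_kept.get .r15 rfl).trans hbody.r15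
      slot_r13 := by
        rw [w_mem]
        u_frame k_r13
      slot_r12 := by
        rw [w_mem]
        u_frame k_r12
      slot_rbp := by
        rw [w_mem]
        u_frame k_rbp
      slot_rbx := by
        rw [w_mem]
        u_frame k_rbx
      slot_ra := by
        rw [w_mem]
        u_frame k_ra
      inv := hinvD
      region := hbody.region
      forest := hbody.forest
      ok := hokD
      rem := by
        rw [hremF]
        exact hbody.rem
      same := by
        rw [w_mem]
        u_same
      code := ProgX.Base.conv_code_in w_eq
      abi := by
        refine ProgX.Base.abiInv_of ?_ ?_
        · rw [w_flags]
          exact w_df_10960d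
        · rw [w_mxcsr]
          exact hmx
    }
    res := by
      right
      rw [w_rbp]
      decide
    ok1 := by
      intro h1
      rw [w_rbp] at h1
      exact absurd h1 (by decide)
    ok0 := fun _ => himgs
  }

end Gif.Spec.DGifGetImageDesc_3
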